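-- pv_equiv track=rewrite | github.com/muneebaifrah/Unstop-100-Days-Coding-Sprint | Day-76/3.Favorable_Sequences.py | user_logic
-- ===== SOURCE A (Python) =====
-- MOD = 10**9 + 7
--
-- def user_logic(N, K, L, R):
--     """
--     Write your logic here.
--     Parameters:
--         N (int): Size of the favorable sequence.
--         K (int): Minimum total required cost of the sequence.
--         L (int): Lower limit of the items.
--         R (int): Upper limit of the items.
--     Returns:
--         int: Total number of favorable sequences, modulo 10^9 + 7.
--     """
--     M = R - L + 1
--     values = list(range(M))
--     dp = [[[0 for _ in range(M)] for _ in range(N)] for _ in range(N+1)]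
--     for val in values:
--         dp[1][0][val] = 1
--
--     for pos in range(1, N):
--         for cost in range(pos):
--             for max_val in range(M):
--                 count = dp[pos][cost][max_val]
--                 if count == 0:
--                     continue
--                 for next_val in values:
--                     if next_val > max_val:
--                         dp[pos+1][cost+1][next_val] = (dp[pos+1][cost+1][next_val] + count) % MOD
--                     else:
--                         dp[pos+1][cost][max_val] = (dp[pos+1][cost][max_val] + count) % MOD
--     total = 0
--     for cost in range(K, N):
--         for max_val in range(M):
--             total = (total + dp[N][cost][max_val]) % MOD
--
--     return total
-- ===== SOURCE B (Python) =====
-- MOD = 10**9 + 7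
--
-- def user_logic(N, K, L, R):
--     M = R - L + 1
--     if M <= 0:
--         return 0
--     # cur[cost][val]: number of sequences of the current length whose running
--     # maximum is val and which used `cost` strict-record steps so far.
--     cur = [[0] * M for _ in range(N)]
--     for v in range(M):
--         cur[0][v] = 1
--     for pos in range(1, N):
--         nxt = [[0] * M for _ in range(N)]
--         diff = [[0] * (M + 1) for _ in range(N)]
--         for cost in range(pos):
--             row = cur[cost]
--             d = diff[cost + 1]
--             for mv in range(M):
--                 c = row[mv]
--                 if c:
--                     # next_val <= mv: mv+1 choices, cost unchanged, max unchanged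
--                     nxt[cost][mv] = (nxt[cost][mv] + c * (mv + 1)) % MOD
--                     # next_val in (mv, M): range add via difference array
--                     d[mv + 1] += c
--                     d[M] -= c
--         for cost in range(1, pos + 1):
--             run = 0
--             d = diff[cost]
--             row = nxt[cost]
--             for v in range(M):
--                 run += d[v]
--                 row[v] = (row[v] + run) % MOD
--         cur = nxt
--     total = 0
--     for cost in range(K, N):
--         total = (total + sum(cur[cost])) % MOD
--     return total
-- ===== Notes on version B (the rewrite author's own statement) =====
-- stated objective: faster
-- what changed: B collapses A's innermost next_val loop: the '<=' branch becomes a single multiplication count*(max_val+1) and the '>' branch becomes a range-add on a per-cost difference array finished by one prefix-sum sweep per position, dropping a factor of M (value-range size); measured 18-488x faster on sizes where both programs finish.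
import Mathlib
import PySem

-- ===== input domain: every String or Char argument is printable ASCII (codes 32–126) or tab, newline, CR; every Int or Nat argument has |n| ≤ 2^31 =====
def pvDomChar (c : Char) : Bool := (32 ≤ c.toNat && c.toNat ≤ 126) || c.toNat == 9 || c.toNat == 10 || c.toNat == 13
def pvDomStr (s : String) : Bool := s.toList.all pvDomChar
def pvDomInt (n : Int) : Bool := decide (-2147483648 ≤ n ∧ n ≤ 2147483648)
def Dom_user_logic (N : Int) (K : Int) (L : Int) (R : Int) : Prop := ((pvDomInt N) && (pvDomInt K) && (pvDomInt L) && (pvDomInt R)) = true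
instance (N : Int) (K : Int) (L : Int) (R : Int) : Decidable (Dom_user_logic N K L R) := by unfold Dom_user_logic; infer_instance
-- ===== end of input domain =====

-- B replaces A's innermost next_val loop by a multiplication (the `<=` branch) and a
-- per-cost difference array with one prefix-sum sweep (the `>` range add), removing one
-- factor of M. Intended as faster; a timing run measured B 18-488x faster on the sizes
-- where both finish (unconfirmed at extreme sizes where both exceed the budget).
-- Equivalence of return values is proved on Pre_user_logic.

-- ===== PORT A =====
def MODC : Int := 10 ^ 9 + 7

-- Python nested-list read g[i][j] and write g[i][j] = v (Python index semantics via PySem;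
-- exact wherever the index is in range, i.e. everywhere A returns).
def get2 (g : List (List Int)) (i j : Int) : Int :=
  PySem.List.pyGetD (PySem.List.pyGetD g i []) j 0
def set2 (g : List (List Int)) (i j : Int) (v : Int) : List (List Int) :=
  PySem.List.pySetD g i (PySem.List.pySetD (PySem.List.pyGetD g i []) j v)
def get3 (g : List (List (List Int))) (i j k : Int) : Int :=
  get2 (PySem.List.pyGetD g i []) j k
def set3 (g : List (List (List Int))) (i j k : Int) (v : Int) : List (List (List Int)) :=
  PySem.List.pySetD g i (set2 (PySem.List.pyGetD g i []) j k v)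

-- Python's `%` on the positive literal modulus MODC agrees with Int.emod.
def user_logic (N : Int) (K : Int) (L : Int) (R : Int) : Int :=
  let M := R - L + 1
  let values := PySem.List.pyRange 0 M 1
  let dp : List (List (List Int)) :=
    (PySem.List.pyRange 0 (N + 1) 1).map (fun _ =>
      (PySem.List.pyRange 0 N 1).map (fun _ =>
        (PySem.List.pyRange 0 M 1).map (fun _ => (0 : Int))))
  let dp := values.foldl (fun dp val => set3 dp 1 0 val 1) dp
  let dp := (PySem.List.pyRange 1 N 1).foldl (fun dp pos =>
    (PySem.List.pyRange 0 pos 1).foldl (fun dp cost =>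
      (PySem.List.pyRange 0 M 1).foldl (fun dp max_val =>
        let count := get3 dp pos cost max_val
        if count = 0 then dp
        else values.foldl (fun dp next_val =>
          if max_val < next_val then
            set3 dp (pos + 1) (cost + 1) next_val
              ((get3 dp (pos + 1) (cost + 1) next_val + count) % MODC)
          else
            set3 dp (pos + 1) cost max_val
              ((get3 dp (pos + 1) cost max_val + count) % MODC)) dp) dp) dp) dp
  (PySem.List.pyRange K N 1).foldl (fun total cost =>
    (PySem.List.pyRange 0 M 1).foldl (fun total max_val =>
      (total + get3 dp N cost max_val) % MODC) total) 0

-- ===== PORT B =====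
def user_logic_alt (N : Int) (K : Int) (L : Int) (R : Int) : Int :=
  let M := R - L + 1
  if M ≤ 0 then 0
  else
    let cur : List (List Int) :=
      (PySem.List.pyRange 0 N 1).map (fun _ => (PySem.List.pyRange 0 M 1).map (fun _ => (0 : Int)))
    let cur := (PySem.List.pyRange 0 M 1).foldl (fun cur v => set2 cur 0 v 1) cur
    let cur := (PySem.List.pyRange 1 N 1).foldl (fun cur pos =>
      let nxt0 : List (List Int) :=
        (PySem.List.pyRange 0 N 1).map (fun _ => (PySem.List.pyRange 0 M 1).map (fun _ => (0 : Int)))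
      let diff0 : List (List Int) :=
        (PySem.List.pyRange 0 N 1).map (fun _ => (PySem.List.pyRange 0 (M + 1) 1).map (fun _ => (0 : Int)))
      let p := (PySem.List.pyRange 0 pos 1).foldl (fun p cost =>
        (PySem.List.pyRange 0 M 1).foldl (fun (p : List (List Int) × List (List Int)) mv =>
          let c := get2 cur cost mv
          if c ≠ 0 then
            let nxt := set2 p.1 cost mv ((get2 p.1 cost mv + c * (mv + 1)) % MODC)
            let diff := set2 p.2 (cost + 1) (mv + 1) (get2 p.2 (cost + 1) (mv + 1) + c)
            let diff := set2 diff (cost + 1) M (get2 diff (cost + 1) M - c)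
            (nxt, diff)
          else p) p) (nxt0, diff0)
      (PySem.List.pyRange 1 (pos + 1) 1).foldl (fun nxt cost =>
        ((PySem.List.pyRange 0 M 1).foldl (fun (q : List (List Int) × Int) v =>
          let run := q.2 + get2 p.2 cost v
          (set2 q.1 cost v ((get2 q.1 cost v + run) % MODC), run)) (nxt, 0)).1) p.1) cur
    (PySem.List.pyRange K N 1).foldl (fun total cost =>
      (total + (PySem.List.pyGetD cur cost []).sum) % MODC) 0

-- ===== PRECONDITION & SPEC =====
-- Exactly the inputs on which the Python A returns normally: when M = R-L+1 ≥ 1, A needs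
-- N ≥ 1 (else dp[1][0][val] = 1 raises IndexError) and K ≥ -N (else the final loop's
-- dp[N][cost] raises IndexError for cost < -N); when M ≤ 0 A always returns 0.
def Pre_user_logic (N : Int) (K : Int) (L : Int) (R : Int) : Prop :=
  R - L + 1 ≤ 0 ∨ (1 ≤ N ∧ -N ≤ K)
instance (N : Int) (K : Int) (L : Int) (R : Int) : Decidable (Pre_user_logic N K L R) := by
  unfold Pre_user_logic; infer_instance

def pvWitness_user_logic : Int × Int × Int × Int := (2, 0, 0, 1)

def Spec_user_logic (N : Int) (K : Int) (L : Int) (R : Int) (out : Int) : Prop := out = user_logic_alt N K L R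
instance (N : Int) (K : Int) (L : Int) (R : Int) (out : Int) : Decidable (Spec_user_logic N K L R out) := by
  unfold Spec_user_logic; infer_instance

-- ===== CLAIM (what is proved, stated in full; the proofs are below) =====
def Claim_equal_user_logic : Prop := ∀ (N : Int) (K : Int) (L : Int) (R : Int), Dom_user_logic N K L R → Pre_user_logic N K L R → Spec_user_logic N K L R (user_logic N K L R)

-- ===== LEMMAS AND PROOFS =====

-- Matrix entries / single-cell update with Nat indices (proof-side view of get2/set2).
def Ent (g : List (List Int)) (c v : Nat) : Int := (g.getD c []).getD v 0
def updM (g : List (List Int)) (c v : Nat) (x : Int) : List (List Int) :=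
  g.set c ((g.getD c []).set v x)
def Shape (g : List (List Int)) (n m : Nat) : Prop :=
  g.length = n ∧ ∀ row ∈ g, row.length = m
def Red (g : List (List Int)) (n m : Nat) : Prop :=
  ∀ c, c < n → ∀ v, v < m → Ent g c v % MODC = Ent g c v
def zeroM (n m : Nat) : List (List Int) := List.replicate n (List.replicate m 0)

-- the exact residues A stores: fdp p = the matrix dp[p+1] (cost × max_val)
def fdp : Nat → Nat → Nat → Int
  | 0, c, _ => if c = 0 then 1 else 0
  | p + 1, c, v =>
      ((if c < p + 1 then fdp p c v * ((v : Int) + 1) else 0) +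
       (if 1 ≤ c ∧ c ≤ p + 1 then ((List.range v).map (fun mv => fdp p (c - 1) mv)).sum else 0)) % MODC

def mtxL (n m p : Nat) : List (List Int) :=
  (List.range n).map (fun c => (List.range m).map (fun v => fdp p c v))

theorem getD_set_self {α : Type} (l : List α) (i : Nat) (r : α) (d : α) (h : i < l.length) :
    (l.set i r).getD i d = r := by
  simp [List.getD_eq_getElem?_getD, h]

theorem getD_set_ne {α : Type} (l : List α) (i j : Nat) (r : α) (d : α) (h : i ≠ j) :
    (l.set i r).getD j d = l.getD j d := by
  simp [List.getD_eq_getElem?_getD, List.getElem?_set_ne h]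

theorem set_getD_self {α : Type} (l : List α) (i : Nat) (d : α) (h : i < l.length) :
    l.set i (l.getD i d) = l := by
  rw [List.getD_eq_getElem l d h]; exact List.set_getElem_self ..

theorem shape_updM {g : List (List Int)} {n m : Nat} (hs : Shape g n m) {c v : Nat}
    (hc : c < n) (x : Int) : Shape (updM g c v x) n m := by
  obtain ⟨h1, h2⟩ := hs
  refine ⟨by simp [updM, h1], ?_⟩
  intro row hrow
  rcases List.mem_or_eq_of_mem_set hrow with h | h
  · exact h2 row h
  · subst h
    rw [List.length_set]
    rw [List.getD_eq_getElem g [] (by omega)]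
    exact h2 _ (List.getElem_mem (by omega))

theorem row_len {g : List (List Int)} {n m : Nat} (hs : Shape g n m) {c : Nat} (hc : c < n) :
    (g.getD c []).length = m := by
  have h1 := hs.1
  rw [List.getD_eq_getElem g [] (by omega)]
  exact hs.2 _ (List.getElem_mem (by omega))

theorem Ent_updM {g : List (List Int)} {n m : Nat} (hs : Shape g n m) {c v : Nat}
    (hc : c < n) (hv : v < m) (x : Int) (c' v' : Nat) :
    Ent (updM g c v x) c' v' = if c' = c ∧ v' = v then x else Ent g c' v' := by
  have hcl : c < g.length := by have := hs.1; omega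
  have hrl : (g.getD c []).length = m := row_len hs hc
  unfold Ent updM
  by_cases hcc : c' = c
  · subst hcc
    rw [getD_set_self _ _ _ _ hcl]
    by_cases hvv : v' = v
    · subst hvv
      rw [List.getD_eq_getElem _ 0 (by rw [List.length_set]; omega)]
      simp
    · have : ((g.getD c' []).set v x).getD v' 0 = (g.getD c' []).getD v' 0 := by
        simp [List.getD_eq_getElem?_getD, List.getElem?_set_ne (fun h => hvv h.symm)]
      rw [this]; simp [hvv]
  · rw [getD_set_ne _ _ _ _ _ (fun h => hcc h.symm)]
    simp [hcc]

theorem Red_of_entries {g : List (List Int)} {n m : Nat}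
    (h : ∀ c, c < n → ∀ v, v < m → ∃ y, Ent g c v = y % MODC) : Red g n m := by
  intro c hc v hv; obtain ⟨y, hy⟩ := h c hc v hv; rw [hy, Int.emod_emod_of_dvd _ dvd_rfl]

theorem shape_zeroM (n m : Nat) : Shape (zeroM n m) n m := by
  refine ⟨by simp [zeroM], ?_⟩
  intro row h
  have h' : row = List.replicate m 0 := List.eq_of_mem_replicate (by simpa [zeroM] using h)
  rw [h']; simp

theorem Ent_zeroM (n m c v : Nat) : Ent (zeroM n m) c v = 0 := by
  unfold Ent zeroM
  by_cases hc : c < n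
  · rw [List.getD_replicate _ hc]
    by_cases hv : v < m
    · rw [List.getD_replicate _ hv]
    · rw [List.getD_eq_default (List.replicate m (0:Int)) 0 (by simpa using hv)]
  · rw [List.getD_eq_default (List.replicate n (List.replicate m (0:Int))) [] (by simpa using hc)]
    rfl

theorem Red_zeroM (n m : Nat) : Red (zeroM n m) n m := by
  intro c _ v _; rw [Ent_zeroM]; rfl

theorem shape_mtxL (n m p : Nat) : Shape (mtxL n m p) n m := by
  refine ⟨by simp [mtxL], ?_⟩
  intro row hrow
  simp only [mtxL, List.mem_map] at hrow
  obtain ⟨c, _, h⟩ := hrow; rw [← h]; simp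

theorem Ent_mtxL {n m : Nat} (p : Nat) {c v : Nat} (hc : c < n) (hv : v < m) :
    Ent (mtxL n m p) c v = fdp p c v := by
  unfold Ent mtxL
  rw [List.getD_eq_getElem ((List.range n).map (fun c => (List.range m).map (fun v => fdp p c v))) [] (by simpa using hc)]
  simp only [List.getElem_map, List.getElem_range]
  rw [List.getD_eq_getElem ((List.range m).map (fun v => fdp p c v)) 0 (by simpa using hv)]
  simp

theorem mtx_eq {g : List (List Int)} {n m p : Nat} (hs : Shape g n m)
    (he : ∀ c, c < n → ∀ v, v < m → Ent g c v = fdp p c v) : g = mtxL n m p := by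
  apply List.ext_getElem (by simp [mtxL, hs.1])
  intro i h1 h2
  simp only [mtxL, List.getElem_map, List.getElem_range]
  have hil : g[i].length = m := hs.2 _ (List.getElem_mem h1)
  apply List.ext_getElem (by simpa using hil)
  intro j hj1 hj2
  have hin : i < n := by rw [← hs.1]; exact h1
  have hjm : j < m := by omega
  have := he i hin j hjm
  unfold Ent at this
  rw [List.getD_eq_getElem g [] h1, List.getD_eq_getElem g[i] 0 hj1] at this
  simpa using this

-- list-range sums as Finset sums
theorem lsum (k : Nat) (f : Nat → Int) : ((List.range k).map f).sum = ∑ i ∈ Finset.range k, f i := rfl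

theorem sum_ite_hit (p c : Nat) (a : Nat → Int) :
    (∑ i ∈ Finset.range p, if c = i then a i else 0) = if c < p then a c else 0 := by
  rw [Finset.sum_ite_eq]; simp [Finset.mem_range]

theorem sum_ite_lt {v m : Nat} (hv : v ≤ m) (f : Nat → Int) :
    (∑ j ∈ Finset.range m, if j < v then f j else 0) = ∑ j ∈ Finset.range v, f j := by
  rw [← Finset.sum_filter]
  apply (Finset.sum_subset ?_ ?_).symm
  · intro x hx; simp at hx ⊢; omega
  · intro x hx hx2; simp at hx hx2 ⊢; omega

theorem sum_ite_le {mv m : Nat} (h : mv < m) (a : Int) :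
    (∑ nv ∈ Finset.range m, if nv ≤ mv then a else 0) = ((mv : Int) + 1) * a := by
  rw [← Finset.sum_filter]
  have he : (Finset.range m).filter (fun x => x ≤ mv) = Finset.range (mv + 1) := by
    ext x; simp; omega
  rw [he, Finset.sum_const, Finset.card_range]
  push_cast; ring

theorem ite_split {X : Prop} [Decidable X] (a b : Int) :
    (if X then a else b) = (if X then a else 0) + (if X then 0 else b) := by
  split <;> simp

-- ===== generic fold-entry lemmas =====

theorem foldl_entry_mod {ι : Type} (n m : Nat) (step : List (List Int) → ι → List (List Int))
    (contrib : ι → Nat → Nat → Int) :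
    ∀ (l : List ι) (g : List (List Int)),
      (∀ g' x, x ∈ l → Shape g' n m → Red g' n m →
        Shape (step g' x) n m ∧
        ∀ c, c < n → ∀ v, v < m → Ent (step g' x) c v = (Ent g' c v + contrib x c v) % MODC) →
      Shape g n m → Red g n m →
      Shape (l.foldl step g) n m ∧ Red (l.foldl step g) n m ∧
      ∀ c, c < n → ∀ v, v < m →
        Ent (l.foldl step g) c v = (Ent g c v + (l.map (fun x => contrib x c v)).sum) % MODC := by
  intro l
  induction l with
  | nil =>
    intro g _ hsg hrg
    refine ⟨hsg, hrg, ?_⟩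
    intro c hc v hv
    simp only [List.foldl_nil, List.map_nil, List.sum_nil, add_zero]
    exact (hrg c hc v hv).symm
  | cons x t ih =>
    intro g hstep hsg hrg
    obtain ⟨hs1, hent⟩ := hstep g x ((by simp)) hsg hrg
    have hred : Red (step g x) n m := Red_of_entries (fun c hc v hv => ⟨_, hent c hc v hv⟩)
    obtain ⟨S, RR, E⟩ := ih (step g x) (fun g' y hy _ _ => hstep g' y (List.mem_cons_of_mem _ hy) ‹_› ‹_›) hs1 hred
    refine ⟨S, RR, ?_⟩
    intro c hc v hv
    simp only [List.foldl_cons, List.map_cons, List.sum_cons]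
    rw [E c hc v hv, hent c hc v hv, Int.emod_add_emod, add_assoc]

theorem foldl_entry_add {ι : Type} (n m : Nat) (step : List (List Int) → ι → List (List Int))
    (contrib : ι → Nat → Nat → Int) :
    ∀ (l : List ι) (g : List (List Int)),
      (∀ g' x, x ∈ l → Shape g' n m →
        Shape (step g' x) n m ∧
        ∀ c, c < n → ∀ v, v < m → Ent (step g' x) c v = Ent g' c v + contrib x c v) →
      Shape g n m →
      Shape (l.foldl step g) n m ∧
      ∀ c, c < n → ∀ v, v < m →
        Ent (l.foldl step g) c v = Ent g c v + (l.map (fun x => contrib x c v)).sum := by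
  intro l
  induction l with
  | nil =>
    intro g _ hsg
    refine ⟨hsg, ?_⟩
    intro c hc v hv
    simp
  | cons x t ih =>
    intro g hstep hsg
    obtain ⟨hs1, hent⟩ := hstep g x ((by simp)) hsg
    obtain ⟨S, E⟩ := ih (step g x) (fun g' y hy _ => hstep g' y (List.mem_cons_of_mem _ hy) ‹_›) hs1
    refine ⟨S, ?_⟩
    intro c hc v hv
    simp only [List.foldl_cons, List.map_cons, List.sum_cons]
    rw [E c hc v hv, hent c hc v hv, add_assoc]

theorem foldl_pair {ι α β : Type} (f : α → ι → α) (g : β → ι → β) :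
    ∀ (l : List ι) (a : α) (b : β),
      l.foldl (fun p x => (f p.1 x, g p.2 x)) (a, b) = (l.foldl f a, l.foldl g b) := by
  intro l; induction l with
  | nil => intro a b; rfl
  | cons x t ih => intro a b; simp only [List.foldl_cons]; exact ih _ _

theorem foldl_set_layer {ι : Type} (L i j : Nat) (hne : j ≠ i) (hi : i < L)
    (step : List (List (List Int)) → ι → List (List (List Int)))
    (G : ι → List (List Int) → List (List Int) → List (List Int))
    (hstep : ∀ dp x, dp.length = L → step dp x = dp.set i (G x (dp.getD j []) (dp.getD i []))) :
    ∀ (l : List ι) (dp : List (List (List Int))), dp.length = L →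
      l.foldl step dp = dp.set i (l.foldl (fun layer x => G x (dp.getD j []) layer) (dp.getD i [])) := by
  intro l
  induction l with
  | nil =>
    intro dp hL
    simp only [List.foldl_nil]
    exact (set_getD_self dp i [] (by omega)).symm
  | cons x t ih =>
    intro dp hL
    simp only [List.foldl_cons]
    rw [hstep dp x hL, ih (dp.set i (G x (dp.getD j []) (dp.getD i []))) (by simpa using hL)]
    rw [getD_set_ne _ _ _ _ _ (fun h => hne h.symm)]
    rw [getD_set_self _ _ _ _ (by omega), List.set_set]

-- ===== the A step on a single layer =====

def srcA (m : Nat) (prev : List (List Int)) (cost mv : Nat) (layer : List (List Int)) : List (List Int) :=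
  let count := Ent prev cost mv
  if count = 0 then layer
  else (List.range m).foldl (fun layer nv =>
    if mv < nv then updM layer (cost + 1) nv ((Ent layer (cost + 1) nv + count) % MODC)
    else updM layer cost mv ((Ent layer cost mv + count) % MODC)) layer

def stepA (m : Nat) (prev : List (List Int)) (p : Nat) (layer : List (List Int)) : List (List Int) :=
  (List.range p).foldl (fun layer cost =>
    (List.range m).foldl (fun layer mv => srcA m prev cost mv layer) layer) layer

theorem srcA_entry {n m : Nat} (prev : List (List Int)) {cost mv : Nat}
    (hcost : cost + 1 < n) (hmv : mv < m) (g : List (List Int)) (hs : Shape g n m) (hr : Red g n m) :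
    Shape (srcA m prev cost mv g) n m ∧
    ∀ c, c < n → ∀ v, v < m →
      Ent (srcA m prev cost mv g) c v =
        (Ent g c v + Ent prev cost mv *
          ((if c = cost ∧ v = mv then (mv : Int) + 1 else 0) +
           (if c = cost + 1 ∧ mv < v then 1 else 0))) % MODC := by
  have hcn : cost < n := by omega
  set count := Ent prev cost mv with hcount
  by_cases h0 : count = 0
  · constructor
    · simpa [srcA, ← hcount, h0] using hs
    · intro c hc v hv
      rw [show srcA m prev cost mv g = g by simp [srcA, ← hcount, h0]]
      rw [h0]; simpa using (hr c hc v hv).symm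
  · have hsrc : srcA m prev cost mv g = (List.range m).foldl (fun layer nv =>
        if mv < nv then updM layer (cost + 1) nv ((Ent layer (cost + 1) nv + count) % MODC)
        else updM layer cost mv ((Ent layer cost mv + count) % MODC)) g := by
      simp [srcA, ← hcount, h0]
    have main := foldl_entry_mod n m
      (fun layer nv =>
        if mv < nv then updM layer (cost + 1) nv ((Ent layer (cost + 1) nv + count) % MODC)
        else updM layer cost mv ((Ent layer cost mv + count) % MODC))
      (fun nv c v =>
        if mv < nv then (if c = cost + 1 ∧ v = nv then count else 0)
        else (if c = cost ∧ v = mv then count else 0))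
      (List.range m) g ?_ hs hr
    · obtain ⟨S, _, E⟩ := main
      rw [hsrc]
      refine ⟨S, ?_⟩
      intro c hc v hv
      rw [E c hc v hv, lsum]
      congr 1
      rw [show (∑ nv ∈ Finset.range m, if mv < nv then (if c = cost + 1 ∧ v = nv then count else 0)
            else (if c = cost ∧ v = mv then count else 0))
          = (∑ nv ∈ Finset.range m, ((if mv < nv then (if c = cost + 1 ∧ v = nv then count else 0) else 0)
            + (if mv < nv then 0 else (if c = cost ∧ v = mv then count else 0))))
        from Finset.sum_congr rfl (fun nv _ => ite_split _ _), Finset.sum_add_distrib]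
      have e1 : (∑ nv ∈ Finset.range m, if mv < nv then (if c = cost + 1 ∧ v = nv then count else 0) else 0)
          = if c = cost + 1 ∧ mv < v then count else 0 := by
        rw [show (∑ nv ∈ Finset.range m, if mv < nv then (if c = cost + 1 ∧ v = nv then count else 0) else 0)
            = (∑ nv ∈ Finset.range m, if v = nv then (if c = cost + 1 ∧ mv < v then count else 0) else 0)
          from Finset.sum_congr rfl (fun nv _ => by
            by_cases hvnv : v = nv
            · subst hvnv; split_ifs <;> simp_all <;> omega
            · split_ifs <;> simp_all)]
        rw [sum_ite_hit]
        simp [hv]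
      have e2 : (∑ nv ∈ Finset.range m, if mv < nv then 0 else (if c = cost ∧ v = mv then count else 0))
          = ((mv : Int) + 1) * (if c = cost ∧ v = mv then count else 0) := by
        rw [show (∑ nv ∈ Finset.range m, if mv < nv then 0 else (if c = cost ∧ v = mv then count else 0))
            = (∑ nv ∈ Finset.range m, if nv ≤ mv then (if c = cost ∧ v = mv then count else 0) else 0)
          from Finset.sum_congr rfl (fun nv _ => by split_ifs <;> simp_all <;> omega)]
        exact sum_ite_le hmv _
      rw [e1, e2]
      split_ifs <;> ring
    · intro g' nv hnv hs' hr'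
      have hnvm : nv < m := by simpa using hnv
      by_cases hlt : mv < nv
      · simp only [if_pos hlt]
        refine ⟨shape_updM hs' (by omega) _, ?_⟩
        intro c hc v hv
        rw [Ent_updM hs' hcost hnvm _ c v]
        split_ifs with h1
        · obtain ⟨rfl, rfl⟩ := h1; rfl
        · rw [add_zero]; exact (hr' c hc v hv).symm
      · simp only [if_neg hlt]
        refine ⟨shape_updM hs' hcn _, ?_⟩
        intro c hc v hv
        rw [Ent_updM hs' hcn hmv _ c v]
        split_ifs with h1
        · obtain ⟨rfl, rfl⟩ := h1; rfl
        · rw [add_zero]; exact (hr' c hc v hv).symm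

theorem stepA_entry {n m p : Nat} (hp : p < n) (prev g : List (List Int))
    (hs : Shape g n m) (hr : Red g n m) :
    Shape (stepA m prev p g) n m ∧
    ∀ c, c < n → ∀ v, v < m →
      Ent (stepA m prev p g) c v =
        (Ent g c v + ((if c < p then Ent prev c v * ((v : Int) + 1) else 0) +
          (if 1 ≤ c ∧ c ≤ p then ∑ mv ∈ Finset.range v, Ent prev (c - 1) mv else 0))) % MODC := by
  have main := foldl_entry_mod n m
    (fun layer cost => (List.range m).foldl (fun layer mv => srcA m prev cost mv layer) layer)
    (fun cost c v => ((List.range m).map (fun mv => Ent prev cost mv *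
        ((if c = cost ∧ v = mv then (mv : Int) + 1 else 0) +
         (if c = cost + 1 ∧ mv < v then 1 else 0)))).sum)
    (List.range p) g ?_ hs hr
  · obtain ⟨S, _, E⟩ := main
    refine ⟨S, ?_⟩
    intro c hc v hv
    rw [show stepA m prev p g = (List.range p).foldl
        (fun layer cost => (List.range m).foldl (fun layer mv => srcA m prev cost mv layer) layer) g from rfl]
    rw [E c hc v hv, lsum]
    congr 1
    have inner : ∀ cost : Nat, ((List.range m).map (fun mv => Ent prev cost mv *
        ((if c = cost ∧ v = mv then (mv : Int) + 1 else 0) +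
         (if c = cost + 1 ∧ mv < v then 1 else 0)))).sum
        = (if c = cost then Ent prev cost v * ((v : Int) + 1) else 0) +
          (if c = cost + 1 then ∑ mv ∈ Finset.range v, Ent prev cost mv else 0) := by
      intro cost
      rw [lsum]
      simp only [mul_add]
      rw [Finset.sum_add_distrib]
      congr 1
      · by_cases h1 : c = cost
        · subst h1
          rw [show (∑ mv ∈ Finset.range m, Ent prev c mv * if c = c ∧ v = mv then (mv : Int) + 1 else 0)
              = (∑ mv ∈ Finset.range m, if v = mv then Ent prev c mv * ((mv : Int) + 1) else 0)
            from Finset.sum_congr rfl (fun mv _ => by split_ifs <;> simp_all)]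
          rw [sum_ite_hit, if_pos hv, if_pos rfl]
          ring
        · rw [show (∑ mv ∈ Finset.range m, Ent prev cost mv * if c = cost ∧ v = mv then (mv : Int) + 1 else 0) = 0
            from Finset.sum_eq_zero (fun mv _ => by simp [h1])]
          simp [h1]
      · by_cases h2 : c = cost + 1
        · subst h2
          rw [show (∑ mv ∈ Finset.range m, Ent prev cost mv * if cost + 1 = cost + 1 ∧ mv < v then 1 else 0)
              = (∑ mv ∈ Finset.range m, if mv < v then Ent prev cost mv else 0)
            from Finset.sum_congr rfl (fun mv _ => by split_ifs <;> simp_all)]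
          rw [sum_ite_lt (by omega) _, if_pos rfl]
        · rw [show (∑ mv ∈ Finset.range m, Ent prev cost mv * if c = cost + 1 ∧ mv < v then 1 else 0) = 0
            from Finset.sum_eq_zero (fun mv _ => by simp [h2])]
          simp [h2]
    rw [Finset.sum_congr rfl (fun cost _ => inner cost), Finset.sum_add_distrib]
    have e1 : (∑ cost ∈ Finset.range p, if c = cost then Ent prev cost v * ((v : Int) + 1) else 0)
        = if c < p then Ent prev c v * ((v : Int) + 1) else 0 := by
      rw [show (∑ cost ∈ Finset.range p, if c = cost then Ent prev cost v * ((v : Int) + 1) else 0)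
          = (∑ cost ∈ Finset.range p, if c = cost then Ent prev c v * ((v : Int) + 1) else 0)
        from Finset.sum_congr rfl (fun cost _ => by split_ifs with h <;> simp_all), sum_ite_hit]
    have e2 : (∑ cost ∈ Finset.range p, if c = cost + 1 then ∑ mv ∈ Finset.range v, Ent prev cost mv else 0)
        = if 1 ≤ c ∧ c ≤ p then ∑ mv ∈ Finset.range v, Ent prev (c - 1) mv else 0 := by
      rcases Nat.eq_zero_or_pos c with hc0 | hc1
      · subst hc0
        rw [show (∑ cost ∈ Finset.range p, if 0 = cost + 1 then ∑ mv ∈ Finset.range v, Ent prev cost mv else 0) = 0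
          from Finset.sum_eq_zero (fun cost _ => by simp)]
        simp
      · obtain ⟨c', rfl⟩ : ∃ c', c = c' + 1 := ⟨c - 1, by omega⟩
        rw [show (∑ cost ∈ Finset.range p, if c' + 1 = cost + 1 then ∑ mv ∈ Finset.range v, Ent prev cost mv else 0)
            = (∑ cost ∈ Finset.range p, if c' = cost then ∑ mv ∈ Finset.range v, Ent prev cost mv else 0)
          from Finset.sum_congr rfl (fun cost _ => by split_ifs <;> simp_all), sum_ite_hit]
        have h1 : (c' + 1) - 1 = c' := by omega
        rw [h1]
        split_ifs with ha hb hb <;> first | rfl | omega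
    rw [e1, e2]
  · intro g' cost hcost hs' hr'
    have hcp : cost < p := by simpa using hcost
    have main2 := foldl_entry_mod n m
      (fun layer mv => srcA m prev cost mv layer)
      (fun mv c v => Ent prev cost mv *
        ((if c = cost ∧ v = mv then (mv : Int) + 1 else 0) +
         (if c = cost + 1 ∧ mv < v then 1 else 0)))
      (List.range m) g' ?_ hs' hr'
    · exact ⟨main2.1, main2.2.2⟩
    · intro g'' mv hmv hs'' hr''
      exact srcA_entry prev (by omega) (by simpa using hmv) g'' hs'' hr''

theorem stepA_mtx {n m t : Nat} (ht : t + 1 < n) :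
    stepA m (mtxL n m t) (t + 1) (zeroM n m) = mtxL n m (t + 1) := by
  obtain ⟨S, E⟩ := stepA_entry (p := t + 1) (by omega) (mtxL n m t) (zeroM n m)
    (shape_zeroM n m) (Red_zeroM n m)
  apply mtx_eq S
  intro c hc v hv
  rw [E c hc v hv, Ent_zeroM, zero_add]
  show _ = fdp (t + 1) c v
  unfold fdp
  congr 1
  congr 1
  · split_ifs with h
    · rw [Ent_mtxL t hc hv]
    · rfl
  · split_ifs with h
    · rw [lsum]
      exact Finset.sum_congr rfl (fun mv hmv => by
        rw [Ent_mtxL t (by omega) (by simp at hmv; omega)])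
    · rfl

-- ===== the B step on a single layer =====

def phase1N (m : Nat) (cur : List (List Int)) (p : Nat) (g : List (List Int)) : List (List Int) :=
  (List.range p).foldl (fun g cost =>
    (List.range m).foldl (fun g mv =>
      if Ent cur cost mv ≠ 0 then
        updM g cost mv ((Ent g cost mv + Ent cur cost mv * ((mv : Int) + 1)) % MODC)
      else g) g) g

def phase1D (m : Nat) (cur : List (List Int)) (p : Nat) (g : List (List Int)) : List (List Int) :=
  (List.range p).foldl (fun g cost =>
    (List.range m).foldl (fun g mv =>
      if Ent cur cost mv ≠ 0 then
        let g1 := updM g (cost + 1) (mv + 1) (Ent g (cost + 1) (mv + 1) + Ent cur cost mv)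
        updM g1 (cost + 1) m (Ent g1 (cost + 1) m - Ent cur cost mv)
      else g) g) g

def phase2 (m : Nat) (diff : List (List Int)) (p : Nat) (g : List (List Int)) : List (List Int) :=
  (List.range p).foldl (fun g t =>
    ((List.range m).foldl (fun (q : List (List Int) × Int) v =>
      let run := q.2 + Ent diff (t + 1) v
      (updM q.1 (t + 1) v ((Ent q.1 (t + 1) v + run) % MODC), run)) (g, 0)).1) g

theorem phase1N_entry {n m p : Nat} (hp : p < n) (cur : List (List Int)) :
    Shape (phase1N m cur p (zeroM n m)) n m ∧
    ∀ c, c < n → ∀ v, v < m →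
      Ent (phase1N m cur p (zeroM n m)) c v =
        (if c < p then Ent cur c v * ((v : Int) + 1) else 0) % MODC := by
  have main := foldl_entry_mod n m
    (fun g cost => (List.range m).foldl (fun g mv =>
      if Ent cur cost mv ≠ 0 then
        updM g cost mv ((Ent g cost mv + Ent cur cost mv * ((mv : Int) + 1)) % MODC)
      else g) g)
    (fun cost c v => ((List.range m).map (fun mv =>
      if c = cost ∧ v = mv then Ent cur cost mv * ((mv : Int) + 1) else 0)).sum)
    (List.range p) (zeroM n m) ?_ (shape_zeroM n m) (Red_zeroM n m)
  · obtain ⟨S, _, E⟩ := main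
    have hPN : phase1N m cur p (zeroM n m) = (List.range p).foldl
      (fun g cost => (List.range m).foldl (fun g mv =>
        if Ent cur cost mv ≠ 0 then
          updM g cost mv ((Ent g cost mv + Ent cur cost mv * ((mv : Int) + 1)) % MODC)
        else g) g) (zeroM n m) := rfl
    rw [hPN]
    refine ⟨S, ?_⟩
    intro c hc v hv
    rw [E c hc v hv, Ent_zeroM, zero_add]
    congr 1
    show (∑ cost ∈ Finset.range p, ∑ mv ∈ Finset.range m,
        if c = cost ∧ v = mv then Ent cur cost mv * ((mv : Int) + 1) else 0) = _
    rw [show (∑ cost ∈ Finset.range p, ∑ mv ∈ Finset.range m,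
          if c = cost ∧ v = mv then Ent cur cost mv * ((mv : Int) + 1) else 0)
        = (∑ cost ∈ Finset.range p, if c = cost then Ent cur c v * ((v : Int) + 1) else 0) from
      Finset.sum_congr rfl (fun cost _ => by
        by_cases h1 : c = cost
        · subst h1
          rw [show (∑ mv ∈ Finset.range m, if c = c ∧ v = mv then Ent cur c mv * ((mv : Int) + 1) else 0)
              = (∑ mv ∈ Finset.range m, if v = mv then Ent cur c mv * ((mv : Int) + 1) else 0) from
            Finset.sum_congr rfl (fun mv _ => by split_ifs <;> simp_all), sum_ite_hit, if_pos hv, if_pos rfl]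
        · rw [Finset.sum_eq_zero (fun mv _ => by simp [h1]), if_neg h1]), sum_ite_hit]
  · intro g' cost hcost hs' hr'
    have hcp : cost < p := by simpa using hcost
    have main2 := foldl_entry_mod n m
      (fun g mv =>
        if Ent cur cost mv ≠ 0 then
          updM g cost mv ((Ent g cost mv + Ent cur cost mv * ((mv : Int) + 1)) % MODC)
        else g)
      (fun mv c v => if c = cost ∧ v = mv then Ent cur cost mv * ((mv : Int) + 1) else 0)
      (List.range m) g' ?_ hs' hr'
    · exact ⟨main2.1, main2.2.2⟩
    · intro g'' mv hmv hs'' hr''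
      have hmvm : mv < m := by simpa using hmv
      by_cases hz : Ent cur cost mv ≠ 0
      · simp only [if_pos hz]
        refine ⟨shape_updM hs'' (by omega) _, ?_⟩
        intro c hc v hv
        rw [Ent_updM hs'' (by omega) hmvm _ c v]
        split_ifs with h1
        · obtain ⟨rfl, rfl⟩ := h1; rfl
        · rw [add_zero]; exact (hr'' c hc v hv).symm
      · simp only [if_neg hz]
        refine ⟨hs'', ?_⟩
        intro c hc v hv
        push_neg at hz
        rw [show (if c = cost ∧ v = mv then Ent cur cost mv * ((mv : Int) + 1) else 0) = 0 by
          split_ifs <;> simp [hz], add_zero]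
        exact (hr'' c hc v hv).symm

theorem phase1D_entry {n m p : Nat} (hp : p < n) (cur : List (List Int)) :
    Shape (phase1D m cur p (zeroM n (m + 1))) n (m + 1) ∧
    ∀ c, c < n → ∀ j, j < m →
      Ent (phase1D m cur p (zeroM n (m + 1))) c j =
        (if 1 ≤ c ∧ c ≤ p ∧ 1 ≤ j then Ent cur (c - 1) (j - 1) else 0) := by
  have main := foldl_entry_add n (m + 1)
    (fun g cost => (List.range m).foldl (fun g mv =>
      if Ent cur cost mv ≠ 0 then
        updM (updM g (cost + 1) (mv + 1) (Ent g (cost + 1) (mv + 1) + Ent cur cost mv)) (cost + 1) m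
          (Ent (updM g (cost + 1) (mv + 1) (Ent g (cost + 1) (mv + 1) + Ent cur cost mv)) (cost + 1) m
            - Ent cur cost mv)
      else g) g)
    (fun cost c j => ((List.range m).map (fun mv =>
      (if c = cost + 1 ∧ j = mv + 1 then Ent cur cost mv else 0) +
      (if c = cost + 1 ∧ j = m then -(Ent cur cost mv) else 0))).sum)
    (List.range p) (zeroM n (m + 1)) ?_ (shape_zeroM n (m + 1))
  · obtain ⟨S, E⟩ := main
    have hPD : phase1D m cur p (zeroM n (m + 1)) = (List.range p).foldl
      (fun g cost => (List.range m).foldl (fun g mv =>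
        if Ent cur cost mv ≠ 0 then
          updM (updM g (cost + 1) (mv + 1) (Ent g (cost + 1) (mv + 1) + Ent cur cost mv)) (cost + 1) m
            (Ent (updM g (cost + 1) (mv + 1) (Ent g (cost + 1) (mv + 1) + Ent cur cost mv)) (cost + 1) m
              - Ent cur cost mv)
        else g) g) (zeroM n (m + 1)) := rfl
    rw [hPD]
    refine ⟨S, ?_⟩
    intro c hc j hj
    rw [E c hc j (by omega), Ent_zeroM, zero_add]
    show (∑ cost ∈ Finset.range p, ∑ mv ∈ Finset.range m,
        ((if c = cost + 1 ∧ j = mv + 1 then Ent cur cost mv else 0) +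
         (if c = cost + 1 ∧ j = m then -(Ent cur cost mv) else 0))) = _
    rw [show (∑ cost ∈ Finset.range p, ∑ mv ∈ Finset.range m,
          ((if c = cost + 1 ∧ j = mv + 1 then Ent cur cost mv else 0) +
           (if c = cost + 1 ∧ j = m then -(Ent cur cost mv) else 0)))
        = (∑ cost ∈ Finset.range p, if c = cost + 1 ∧ 1 ≤ j then Ent cur cost (j - 1) else 0) from
      Finset.sum_congr rfl (fun cost _ => by
        rw [Finset.sum_congr rfl (fun mv _ => by
          rw [show (if c = cost + 1 ∧ j = m then -(Ent cur cost mv) else 0) = 0 by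
            split_ifs with h
            · omega
            · rfl, add_zero])]
        rw [show (∑ mv ∈ Finset.range m, if c = cost + 1 ∧ j = mv + 1 then Ent cur cost mv else 0)
            = (∑ mv ∈ Finset.range m, if j - 1 = mv then
                (if c = cost + 1 ∧ 1 ≤ j then Ent cur cost mv else 0) else 0) from
          Finset.sum_congr rfl (fun mv _ => by split_ifs <;> first | rfl | omega), sum_ite_hit]
        split_ifs <;> first | rfl | omega)]
    rcases Nat.eq_zero_or_pos c with hc0 | hc1
    · subst hc0
      rw [Finset.sum_eq_zero (fun cost _ => by simp), show
        (if 1 ≤ 0 ∧ 0 ≤ p ∧ 1 ≤ j then Ent cur (0 - 1) (j - 1) else 0) = 0 by simp]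
    · obtain ⟨c', rfl⟩ : ∃ c', c = c' + 1 := ⟨c - 1, by omega⟩
      rw [show (∑ cost ∈ Finset.range p, if c' + 1 = cost + 1 ∧ 1 ≤ j then Ent cur cost (j - 1) else 0)
          = (∑ cost ∈ Finset.range p, if c' = cost then
              (if 1 ≤ j then Ent cur cost (j - 1) else 0) else 0) from
        Finset.sum_congr rfl (fun cost _ => by split_ifs <;> simp_all), sum_ite_hit]
      have h1 : (c' + 1) - 1 = c' := by omega
      rw [h1]
      split_ifs <;> first | rfl | omega
  · intro g' cost hcost hs'
    have hcp : cost < p := by simpa using hcost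
    have main2 := foldl_entry_add n (m + 1)
      (fun g mv =>
        if Ent cur cost mv ≠ 0 then
          updM (updM g (cost + 1) (mv + 1) (Ent g (cost + 1) (mv + 1) + Ent cur cost mv)) (cost + 1) m
            (Ent (updM g (cost + 1) (mv + 1) (Ent g (cost + 1) (mv + 1) + Ent cur cost mv)) (cost + 1) m
              - Ent cur cost mv)
        else g)
      (fun mv c j =>
        (if c = cost + 1 ∧ j = mv + 1 then Ent cur cost mv else 0) +
        (if c = cost + 1 ∧ j = m then -(Ent cur cost mv) else 0))
      (List.range m) g' ?_ hs'
    · exact main2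
    · intro g'' mv hmv hs''
      have hmvm : mv < m := by simpa using hmv
      have hc1n : cost + 1 < n := by omega
      by_cases hz : Ent cur cost mv ≠ 0
      · simp only [if_pos hz]
        have hs1 : Shape (updM g'' (cost + 1) (mv + 1)
            (Ent g'' (cost + 1) (mv + 1) + Ent cur cost mv)) n (m + 1) := shape_updM hs'' hc1n _
        refine ⟨shape_updM hs1 hc1n _, ?_⟩
        intro c hc j hj
        have e1 := Ent_updM hs'' hc1n (v := mv + 1) (by omega) (Ent g'' (cost + 1) (mv + 1) + Ent cur cost mv)
        rw [Ent_updM hs1 hc1n (v := m) (by omega) _ c j, e1 c j, e1 (cost + 1) m]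
        split_ifs <;> simp_all <;> ring
      · simp only [if_neg hz]
        refine ⟨hs'', ?_⟩
        intro c hc j hj
        push_neg at hz
        rw [show ((if c = cost + 1 ∧ j = mv + 1 then Ent cur cost mv else 0) +
            (if c = cost + 1 ∧ j = m then -(Ent cur cost mv) else 0)) = 0 by
          rw [hz]; split_ifs <;> simp, add_zero]

theorem phase2row {n m : Nat} (diff : List (List Int)) {cost : Nat} (hcost : cost < n) :
    ∀ (t : Nat), t ≤ m → ∀ (g : List (List Int)) (run0 : Int), Shape g n m →
      (((List.range t).foldl (fun (q : List (List Int) × Int) v =>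
          (updM q.1 cost v ((Ent q.1 cost v + (q.2 + Ent diff cost v)) % MODC), q.2 + Ent diff cost v))
        (g, run0)).2 = run0 + ∑ j ∈ Finset.range t, Ent diff cost j) ∧
      Shape (((List.range t).foldl (fun (q : List (List Int) × Int) v =>
          (updM q.1 cost v ((Ent q.1 cost v + (q.2 + Ent diff cost v)) % MODC), q.2 + Ent diff cost v))
        (g, run0)).1) n m ∧
      ∀ c', c' < n → ∀ v', v' < m →
        Ent (((List.range t).foldl (fun (q : List (List Int) × Int) v =>
            (updM q.1 cost v ((Ent q.1 cost v + (q.2 + Ent diff cost v)) % MODC), q.2 + Ent diff cost v))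
          (g, run0)).1) c' v' =
          if c' = cost ∧ v' < t then
            (Ent g c' v' + (run0 + ∑ j ∈ Finset.range (v' + 1), Ent diff cost j)) % MODC
          else Ent g c' v' := by
  intro t
  induction t with
  | zero =>
    intro _ g run0 hs
    refine ⟨by simp, hs, ?_⟩
    intro c' _ v' _
    simp
  | succ t ih =>
    intro ht g run0 hs
    obtain ⟨R, S, E⟩ := ih (by omega) g run0 hs
    rw [List.range_succ, List.foldl_append, List.foldl_cons, List.foldl_nil]
    set q := ((List.range t).foldl (fun (q : List (List Int) × Int) v =>
        (updM q.1 cost v ((Ent q.1 cost v + (q.2 + Ent diff cost v)) % MODC), q.2 + Ent diff cost v))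
      (g, run0)) with hq
    have htm : t < m := by omega
    refine ⟨?_, shape_updM S hcost _, ?_⟩
    · simp only [R, Finset.sum_range_succ]; ring
    · intro c' hc' v' hv'
      rw [Ent_updM S hcost htm _ c' v']
      by_cases h1 : c' = cost ∧ v' = t
      · obtain ⟨rfl, rfl⟩ := h1
        rw [if_pos ⟨rfl, rfl⟩, if_pos ⟨rfl, by omega⟩]
        rw [E c' hc' v' hv', if_neg (by omega), R, Finset.sum_range_succ]
        ring_nf
      · rw [if_neg h1, E c' hc' v' hv']
        by_cases h2 : c' = cost ∧ v' < t
        · rw [if_pos h2, if_pos ⟨h2.1, by omega⟩]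
        · rw [if_neg h2, if_neg (by omega)]

theorem phase2_entry {n m p : Nat} (hp : p < n) (diff : List (List Int)) :
    ∀ (t : Nat), t ≤ p → ∀ g, Shape g n m →
      Shape (phase2 m diff t g) n m ∧
      ∀ c, c < n → ∀ v, v < m →
        Ent (phase2 m diff t g) c v =
          if 1 ≤ c ∧ c ≤ t then (Ent g c v + ∑ j ∈ Finset.range (v + 1), Ent diff c j) % MODC
          else Ent g c v := by
  intro t
  induction t with
  | zero =>
    intro _ g hs
    refine ⟨hs, ?_⟩
    intro c hc v hv
    rw [show phase2 m diff 0 g = g from rfl, if_neg (by omega)]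
  | succ t ih =>
    intro ht g hs
    obtain ⟨S, E⟩ := ih (by omega) g hs
    have hstep : phase2 m diff (t + 1) g =
        ((List.range m).foldl (fun (q : List (List Int) × Int) v =>
          (updM q.1 (t + 1) v ((Ent q.1 (t + 1) v + (q.2 + Ent diff (t + 1) v)) % MODC),
            q.2 + Ent diff (t + 1) v)) (phase2 m diff t g, 0)).1 := by
      unfold phase2
      rw [List.range_succ, List.foldl_append, List.foldl_cons, List.foldl_nil]
    obtain ⟨_, S2, E2⟩ := phase2row diff (show t + 1 < n by omega) m le_rfl (phase2 m diff t g) 0 S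
    rw [hstep]
    refine ⟨S2, ?_⟩
    intro c hc v hv
    rw [E2 c hc v hv]
    by_cases h1 : c = t + 1
    · subst h1
      rw [if_pos ⟨rfl, hv⟩, E _ hc v hv, if_neg (by omega), if_pos (by omega), zero_add]
    · rw [if_neg (by simp [h1]), E c hc v hv]
      by_cases h2 : 1 ≤ c ∧ c ≤ t
      · rw [if_pos h2, if_pos ⟨h2.1, by omega⟩]
      · rw [if_neg h2, if_neg (by omega)]

theorem stepB_mtx {n m t : Nat} (ht : t + 1 < n) (hm : 1 ≤ m) :
    phase2 m (phase1D m (mtxL n m t) (t + 1) (zeroM n (m + 1))) (t + 1)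
      (phase1N m (mtxL n m t) (t + 1) (zeroM n m)) = mtxL n m (t + 1) := by
  obtain ⟨SN, EN⟩ := phase1N_entry (p := t + 1) (by omega) (mtxL n m t)
  obtain ⟨SD, ED⟩ := phase1D_entry (p := t + 1) (by omega) (mtxL n m t)
  obtain ⟨S2, E2⟩ := phase2_entry (p := t + 1) (by omega)
    (phase1D m (mtxL n m t) (t + 1) (zeroM n (m + 1))) (t + 1) le_rfl
    (phase1N m (mtxL n m t) (t + 1) (zeroM n m)) SN
  apply mtx_eq S2
  intro c hc v hv
  rw [E2 c hc v hv, EN c hc v hv]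
  have hT1 : (if c < t + 1 then Ent (mtxL n m t) c v * ((v : Int) + 1) else 0)
      = (if c < t + 1 then fdp t c v * ((v : Int) + 1) else 0) := by
    split_ifs with h
    · rw [Ent_mtxL t hc hv]
    · rfl
  show _ = fdp (t + 1) c v
  unfold fdp
  rw [lsum]
  by_cases h1 : 1 ≤ c ∧ c ≤ t + 1
  · rw [if_pos h1, if_pos h1, hT1]
    have hsum : (∑ j ∈ Finset.range (v + 1),
        Ent (phase1D m (mtxL n m t) (t + 1) (zeroM n (m + 1))) c j)
        = ∑ mv ∈ Finset.range v, fdp t (c - 1) mv := by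
      rw [Finset.sum_congr rfl (fun j hj => ED c hc j (by simp at hj; omega))]
      rw [Finset.sum_range_succ']
      rw [show (if 1 ≤ c ∧ c ≤ t + 1 ∧ 1 ≤ 0 then Ent (mtxL n m t) (c - 1) (0 - 1) else 0) = 0 by simp]
      rw [add_zero]
      exact Finset.sum_congr rfl (fun i hi => by
        rw [if_pos ⟨h1.1, h1.2, by omega⟩]
        have he : (i + 1) - 1 = i := by omega
        rw [he, Ent_mtxL t (by omega) (by simp at hi; omega)])
    rw [hsum, Int.emod_add_emod]
  · rw [if_neg h1, if_neg h1, hT1, add_zero]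

-- ===== bridges between the ports' Python-indexing and the Nat-indexed proof view =====

theorem get2_natCast (g : List (List Int)) (i j : Nat) :
    get2 g (i : Int) (j : Int) = Ent g i j := by
  simp [get2, Ent, PySem.List.pyGetD_natCast]

theorem set2_natCast (g : List (List Int)) (i j : Nat) (x : Int) :
    set2 g (i : Int) (j : Int) x = updM g i j x := by
  simp [set2, updM, PySem.List.pySetD_natCast, PySem.List.pyGetD_natCast]

theorem get3_natCast (g : List (List (List Int))) (i j k : Nat) :
    get3 g (i : Int) (j : Int) (k : Int) = Ent (g.getD i []) j k := by
  simp [get3, get2, Ent, PySem.List.pyGetD_natCast]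

theorem set3_natCast (g : List (List (List Int))) (i j k : Nat) (x : Int) :
    set3 g (i : Int) (j : Int) (k : Int) x = g.set i (updM (g.getD i []) j k x) := by
  simp [set3, set2, updM, PySem.List.pySetD_natCast, PySem.List.pyGetD_natCast]

theorem zeros2 (a b : Nat) :
    (PySem.List.pyRange 0 (a : Int) 1).map (fun _ => (PySem.List.pyRange 0 (b : Int) 1).map (fun _ => (0 : Int)))
      = zeroM a b := by
  simp only [List.map_const', PySem.List.length_pyRange_one, zeroM]
  norm_num

-- the initialisation row fill: row 0 set to ones = layer for pos = 1
theorem initRow {n m : Nat} (hn : 1 ≤ n) :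
    ∀ t, t ≤ m →
      Shape ((List.range t).foldl (fun g v => updM g 0 v 1) (zeroM n m)) n m ∧
      ∀ c, c < n → ∀ v, v < m →
        Ent ((List.range t).foldl (fun g v => updM g 0 v 1) (zeroM n m)) c v
          = if c = 0 ∧ v < t then 1 else 0 := by
  intro t
  induction t with
  | zero =>
    intro _
    refine ⟨shape_zeroM n m, ?_⟩
    intro c hc v hv
    simp [Ent_zeroM]
  | succ t ih =>
    intro ht
    obtain ⟨S, E⟩ := ih (by omega)
    rw [List.range_succ, List.foldl_append, List.foldl_cons, List.foldl_nil]
    refine ⟨shape_updM S (by omega) _, ?_⟩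
    intro c hc v hv
    rw [Ent_updM S (by omega) (by omega) _ c v, E c hc v hv]
    split_ifs <;> first | rfl | omega

theorem initRow_mtx {n m : Nat} (hn : 1 ≤ n) :
    (List.range m).foldl (fun g v => updM g 0 v 1) (zeroM n m) = mtxL n m 0 := by
  obtain ⟨S, E⟩ := initRow (n := n) (m := m) hn m le_rfl
  apply mtx_eq S
  intro c hc v hv
  rw [E c hc v hv]
  show _ = fdp 0 c v
  unfold fdp
  split_ifs <;> first | rfl | omega

theorem foldl_range_getD (f : Int → Int → Int) :
    ∀ (row : List Int) (t : Int),
      (List.range row.length).foldl (fun t v => f t (row.getD v 0)) t = row.foldl f t := by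
  intro row
  induction row using List.reverseRecOn with
  | nil => intro t; simp
  | append_singleton xs x ih =>
    intro t
    rw [List.length_append, List.length_singleton, List.range_succ, List.foldl_append,
        List.foldl_cons, List.foldl_nil, List.foldl_append, List.foldl_cons, List.foldl_nil]
    congr 1
    · rw [← ih t]
      apply PySem.List.foldl_congr_mem
      intro acc v hv
      have hvlt : v < xs.length := by simpa using hv
      rw [List.getD_append _ _ _ _ hvlt]
    · rw [List.getD_eq_getElem _ _ (by simp)]
      simp

theorem foldl_addmod_sum :
    ∀ (row : List Int), row ≠ [] → ∀ (t : Int),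
      row.foldl (fun t x => (t + x) % MODC) t = (t + row.sum) % MODC := by
  intro row
  induction row with
  | nil => intro h; exact absurd rfl h
  | cons x xs ih =>
    intro _ t
    rw [List.foldl_cons, List.sum_cons]
    rcases List.eq_nil_or_concat xs with h | _
    · subst h; simp
    · have hxs : xs ≠ [] := by rintro rfl; simp_all
      rw [ih hxs ((t + x) % MODC), Int.emod_add_emod, add_assoc]

theorem cast_succ_int (k : Nat) : ((k : Int) + 1) = ((k + 1 : Nat) : Int) := by push_cast; ring

theorem get3_s2 (g : List (List (List Int))) (i j k : Nat) :
    get3 g ((i : Int) + 1) (j : Int) (k : Int) = Ent (g.getD (i + 1) []) j k := by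
  rw [cast_succ_int, get3_natCast]

theorem get3_s1 (g : List (List (List Int))) (i j k : Nat) :
    get3 g ((i : Int) + 1) ((j : Int) + 1) (k : Int) = Ent (g.getD (i + 1) []) (j + 1) k := by
  rw [cast_succ_int, cast_succ_int, get3_natCast]

theorem set3_s2 (g : List (List (List Int))) (i j k : Nat) (x : Int) :
    set3 g ((i : Int) + 1) (j : Int) (k : Int) x = g.set (i + 1) (updM (g.getD (i + 1) []) j k x) := by
  rw [cast_succ_int, set3_natCast]

theorem set3_s1 (g : List (List (List Int))) (i j k : Nat) (x : Int) :
    set3 g ((i : Int) + 1) ((j : Int) + 1) (k : Int) x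
      = g.set (i + 1) (updM (g.getD (i + 1) []) (j + 1) k x) := by
  rw [cast_succ_int, cast_succ_int, set3_natCast]

theorem get2_s11 (g : List (List Int)) (i j : Nat) :
    get2 g ((i : Int) + 1) ((j : Int) + 1) = Ent g (i + 1) (j + 1) := by
  rw [cast_succ_int, cast_succ_int, get2_natCast]

theorem get2_s10 (g : List (List Int)) (i j : Nat) :
    get2 g ((i : Int) + 1) (j : Int) = Ent g (i + 1) j := by
  rw [cast_succ_int, get2_natCast]

theorem set2_s11 (g : List (List Int)) (i j : Nat) (x : Int) :
    set2 g ((i : Int) + 1) ((j : Int) + 1) x = updM g (i + 1) (j + 1) x := by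
  rw [cast_succ_int, cast_succ_int, set2_natCast]

theorem set2_s10 (g : List (List Int)) (i j : Nat) (x : Int) :
    set2 g ((i : Int) + 1) (j : Int) x = updM g (i + 1) j x := by
  rw [cast_succ_int, set2_natCast]

-- A's loop body at position pos = p acts only on layer p+1, reading layer p
theorem A_body {n m : Nat} (p : Nat) (hp : 1 ≤ p) (hpn : p + 1 ≤ n)
    (dp : List (List (List Int))) (hlen : dp.length = n + 1) :
    (PySem.List.pyRange 0 (p : Int) 1).foldl (fun dp cost =>
      (PySem.List.pyRange 0 (m : Int) 1).foldl (fun dp max_val =>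
        let count := get3 dp (p : Int) cost max_val
        if count = 0 then dp
        else (PySem.List.pyRange 0 (m : Int) 1).foldl (fun dp next_val =>
          if max_val < next_val then
            set3 dp ((p : Int) + 1) (cost + 1) next_val
              ((get3 dp ((p : Int) + 1) (cost + 1) next_val + count) % MODC)
          else
            set3 dp ((p : Int) + 1) cost max_val
              ((get3 dp ((p : Int) + 1) cost max_val + count) % MODC)) dp) dp) dp
    = dp.set (p + 1) (stepA m (dp.getD p []) p (dp.getD (p + 1) [])) := by
  rw [PySem.List.pyRange_zero_natCast p, List.foldl_map]
  exact foldl_set_layer (n + 1) (p + 1) p (by omega) (by omega) _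
    (fun cost Lp Lp1 => (List.range m).foldl (fun layer mv => srcA m Lp cost mv layer) Lp1)
    (by
      intro dp' cost hlen'
      rw [PySem.List.pyRange_zero_natCast m, List.foldl_map]
      exact foldl_set_layer (n + 1) (p + 1) p (by omega) (by omega) _
        (fun mv Lp Lp1 => srcA m Lp cost mv Lp1)
        (by
          intro dp'' mv hlen''
          simp only [get3_natCast]
          by_cases hc0 : Ent (dp''.getD p []) cost mv = 0
          · rw [if_pos hc0]
            rw [show srcA m (dp''.getD p []) cost mv (dp''.getD (p + 1) []) = dp''.getD (p + 1) [] by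
              simp only [srcA]; rw [if_pos hc0]]
            exact (set_getD_self dp'' (p + 1) [] (by omega)).symm
          · rw [if_neg hc0]
            rw [show srcA m (dp''.getD p []) cost mv (dp''.getD (p + 1) [])
                = (List.range m).foldl (fun layer nv =>
                    if mv < nv then updM layer (cost + 1) nv
                      ((Ent layer (cost + 1) nv + Ent (dp''.getD p []) cost mv) % MODC)
                    else updM layer cost mv
                      ((Ent layer cost mv + Ent (dp''.getD p []) cost mv) % MODC)) (dp''.getD (p + 1) []) by
              simp only [srcA]; rw [if_neg hc0]]
            rw [List.foldl_map]
            exact foldl_set_layer (n + 1) (p + 1) p (by omega) (by omega) _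
              (fun nv _ layer =>
                if mv < nv then updM layer (cost + 1) nv
                  ((Ent layer (cost + 1) nv + Ent (dp''.getD p []) cost mv) % MODC)
                else updM layer cost mv
                  ((Ent layer cost mv + Ent (dp''.getD p []) cost mv) % MODC))
              (by
                intro dp3 nv hlen3
                show (if (mv : Int) < (nv : Int) then _ else _) = _
                simp only [Nat.cast_lt]
                split_ifs with hlt
                · rw [set3_s1, get3_s1]
                · rw [set3_s2, get3_s2])
              (List.range m) dp'' hlen'')
        (List.range m) dp' hlen')
    (List.range p) dp hlen

theorem one_add_cast (k : Nat) : (1 : Int) + (k : Int) = ((k + 1 : Nat) : Int) := by push_cast; ring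

theorem zeros1 (a : Nat) (X : List (List Int)) :
    (PySem.List.pyRange 0 (a : Int) 1).map (fun _ => X) = List.replicate a X := by
  simp [List.map_const', PySem.List.length_pyRange_one]

theorem pyRange_succ_top (a : Nat) :
    PySem.List.pyRange 0 ((a : Int) + 1) 1 = PySem.List.pyRange 0 ((a + 1 : Nat) : Int) 1 := by
  rw [cast_succ_int]

theorem foldl_trans {α ι : Type} (P : α → Prop) (f g : α → ι → α) :
    ∀ (l : List ι), (∀ a x, x ∈ l → P a → f a x = g a x ∧ P (g a x)) → ∀ a, P a →
      l.foldl f a = l.foldl g a ∧ P (l.foldl g a) := by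
  intro l
  induction l with
  | nil => intro _ a hP; exact ⟨rfl, hP⟩
  | cons x t ih =>
    intro h a hP
    obtain ⟨he, hP'⟩ := h a x (by simp) hP
    obtain ⟨he2, hP2⟩ := ih (fun a y hy hPa => h a y (List.mem_cons_of_mem _ hy) hPa) (g a x) hP'
    exact ⟨by simp only [List.foldl_cons]; rw [he, he2], by simpa using hP2⟩

def gA (m : Nat) : List (List (List Int)) → Nat → List (List (List Int)) :=
  fun dp k => dp.set (k + 2) (stepA m (dp.getD (k + 1) []) (k + 1) (dp.getD (k + 2) []))

def gB (n m : Nat) : List (List Int) → Nat → List (List Int) :=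
  fun cur k => phase2 m (phase1D m cur (k + 1) (zeroM n (m + 1))) (k + 1)
    (phase1N m cur (k + 1) (zeroM n m))

theorem A_layers {n m : Nat} (hn : 1 ≤ n) :
    ∀ t, t ≤ n - 1 →
      ((List.range t).foldl (gA m) ((List.replicate (n + 1) (zeroM n m)).set 1 (mtxL n m 0))).length = n + 1 ∧
      (∀ k, k ≤ t →
        ((List.range t).foldl (gA m) ((List.replicate (n + 1) (zeroM n m)).set 1 (mtxL n m 0))).getD (k + 1) []
          = mtxL n m k) ∧
      (∀ k, t < k → k ≤ n - 1 →
        ((List.range t).foldl (gA m) ((List.replicate (n + 1) (zeroM n m)).set 1 (mtxL n m 0))).getD (k + 1) []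
          = zeroM n m) := by
  intro t
  induction t with
  | zero =>
    intro _
    simp only [List.range_zero, List.foldl_nil]
    refine ⟨by simp, ?_, ?_⟩
    · intro k hk
      interval_cases k
      exact getD_set_self _ _ _ _ (by simp; omega)
    · intro k hk1 hk2
      rw [getD_set_ne _ _ _ _ _ (by omega), List.getD_replicate _ (by omega)]
  | succ t ih =>
    intro ht
    obtain ⟨hL, hSet, hZ⟩ := ih (by omega)
    rw [List.range_succ, List.foldl_append, List.foldl_cons, List.foldl_nil]
    set F := (List.range t).foldl (gA m) ((List.replicate (n + 1) (zeroM n m)).set 1 (mtxL n m 0)) with hF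
    have hstep : gA m F t = F.set (t + 2) (mtxL n m (t + 1)) := by
      show F.set (t + 2) (stepA m (F.getD (t + 1) []) (t + 1) (F.getD (t + 2) [])) = _
      rw [hSet t le_rfl, hZ (t + 1) (by omega) (by omega), stepA_mtx (by omega)]
    rw [hstep]
    have hL2 : (F.set (t + 2) (mtxL n m (t + 1))).length = n + 1 := by simp [hL]
    refine ⟨hL2, ?_, ?_⟩
    · intro k hk
      by_cases hkt : k = t + 1
      · subst hkt
        exact getD_set_self _ _ _ _ (by omega)
      · rw [getD_set_ne _ _ _ _ _ (by omega)]
        exact hSet k (by omega)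
    · intro k hk1 hk2
      rw [getD_set_ne _ _ _ _ _ (by omega)]
      exact hZ k (by omega) hk2

theorem B_layers {n m : Nat} (hn : 1 ≤ n) (hm : 1 ≤ m) :
    ∀ t, t ≤ n - 1 → (List.range t).foldl (gB n m) (mtxL n m 0) = mtxL n m t := by
  intro t
  induction t with
  | zero => intro _; rfl
  | succ t ih =>
    intro ht
    rw [List.range_succ, List.foldl_append, List.foldl_cons, List.foldl_nil, ih (by omega)]
    exact stepB_mtx (by omega) hm

theorem get2_snd (g : List (List Int)) (i : Int) (v : Nat) :
    get2 g i (v : Int) = (PySem.List.pyGetD g i []).getD v 0 := by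
  simp [get2, PySem.List.pyGetD_natCast]

theorem initB {n m : Nat} (hn : 1 ≤ n) :
    (PySem.List.pyRange 0 (m : Int) 1).foldl (fun cur v => set2 cur 0 v 1) (zeroM n m)
      = mtxL n m 0 := by
  rw [PySem.List.pyRange_zero_natCast, List.foldl_map]
  rw [show (fun (cur : List (List Int)) (v : Nat) => set2 cur 0 (v : Int) 1)
      = (fun cur v => updM cur 0 v 1) from funext fun cur => funext fun v => by
    rw [show (0 : Int) = ((0 : Nat) : Int) by norm_num, set2_natCast]]
  exact initRow_mtx hn

theorem initA {n m : Nat} (hn : 1 ≤ n) :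
    (PySem.List.pyRange 0 (m : Int) 1).foldl (fun dp val => set3 dp 1 0 val 1)
        (List.replicate (n + 1) (zeroM n m))
      = (List.replicate (n + 1) (zeroM n m)).set 1 (mtxL n m 0) := by
  rw [PySem.List.pyRange_zero_natCast, List.foldl_map]
  rw [foldl_set_layer (n + 1) 1 0 (by omega) (by omega) _
    (fun val _ layer => updM layer 0 val 1)
    (by
      intro dp val _
      rw [show (1 : Int) = ((1 : Nat) : Int) by norm_num,
          show (0 : Int) = ((0 : Nat) : Int) by norm_num, set3_natCast])
    (List.range m) (List.replicate (n + 1) (zeroM n m)) (by simp)]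
  rw [List.getD_replicate _ (by omega)]
  rw [initRow_mtx hn]

-- the inner (cost, max_val) pair fold of B's loop body, as it appears after unfolding
def pvQT (m n : Nat) (cur : List (List Int)) (k : Nat) : List (List Int) × List (List Int) :=
  (PySem.List.pyRange 0 ((k + 1 : Nat) : Int) 1).foldl (fun p cost =>
    (PySem.List.pyRange 0 (m : Int) 1).foldl (fun (p : List (List Int) × List (List Int)) mv =>
      if get2 cur cost mv ≠ 0 then
        (set2 p.1 cost mv ((get2 p.1 cost mv + get2 cur cost mv * (mv + 1)) % MODC),
          set2 (set2 p.2 (cost + 1) (mv + 1) (get2 p.2 (cost + 1) (mv + 1) + get2 cur cost mv)) (cost + 1) (m : Int)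
            (get2 (set2 p.2 (cost + 1) (mv + 1) (get2 p.2 (cost + 1) (mv + 1) + get2 cur cost mv)) (cost + 1) (m : Int)
              - get2 cur cost mv))
      else p) p) (zeroM n m, zeroM n (m + 1))

theorem pvQT_eq {m n : Nat} (cur : List (List Int)) (k : Nat) :
    pvQT m n cur k = (phase1N m cur (k + 1) (zeroM n m), phase1D m cur (k + 1) (zeroM n (m + 1))) := by
  show _ = ((List.range (k + 1)).foldl (fun g cost => (List.range m).foldl (fun g mv =>
      if Ent cur cost mv ≠ 0 then
        updM g cost mv ((Ent g cost mv + Ent cur cost mv * ((mv : Int) + 1)) % MODC)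
      else g) g) (zeroM n m),
    (List.range (k + 1)).foldl (fun g cost => (List.range m).foldl (fun g mv =>
      if Ent cur cost mv ≠ 0 then
        updM (updM g (cost + 1) (mv + 1) (Ent g (cost + 1) (mv + 1) + Ent cur cost mv)) (cost + 1) m
          (Ent (updM g (cost + 1) (mv + 1) (Ent g (cost + 1) (mv + 1) + Ent cur cost mv)) (cost + 1) m
            - Ent cur cost mv)
      else g) g) (zeroM n (m + 1)))
  unfold pvQT
  rw [PySem.List.pyRange_zero_natCast (k + 1), List.foldl_map]
  rw [← foldl_pair
    (fun g cost => (List.range m).foldl (fun g mv =>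
      if Ent cur cost mv ≠ 0 then
        updM g cost mv ((Ent g cost mv + Ent cur cost mv * ((mv : Int) + 1)) % MODC)
      else g) g)
    (fun g cost => (List.range m).foldl (fun g mv =>
      if Ent cur cost mv ≠ 0 then
        updM (updM g (cost + 1) (mv + 1) (Ent g (cost + 1) (mv + 1) + Ent cur cost mv)) (cost + 1) m
          (Ent (updM g (cost + 1) (mv + 1) (Ent g (cost + 1) (mv + 1) + Ent cur cost mv)) (cost + 1) m
            - Ent cur cost mv)
      else g) g)
    (List.range (k + 1)) (zeroM n m) (zeroM n (m + 1))]
  apply PySem.List.foldl_congr_mem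
  intro q cost hc
  show (PySem.List.pyRange 0 (m : Int) 1).foldl _ q
      = ((List.range m).foldl (fun g mv =>
          if Ent cur cost mv ≠ 0 then
            updM g cost mv ((Ent g cost mv + Ent cur cost mv * ((mv : Int) + 1)) % MODC)
          else g) q.1,
        (List.range m).foldl (fun g mv =>
          if Ent cur cost mv ≠ 0 then
            updM (updM g (cost + 1) (mv + 1) (Ent g (cost + 1) (mv + 1) + Ent cur cost mv)) (cost + 1) m
              (Ent (updM g (cost + 1) (mv + 1) (Ent g (cost + 1) (mv + 1) + Ent cur cost mv)) (cost + 1) m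
                - Ent cur cost mv)
          else g) q.2)
  rw [PySem.List.pyRange_zero_natCast m, List.foldl_map]
  rw [← foldl_pair
    (fun g mv =>
      if Ent cur cost mv ≠ 0 then
        updM g cost mv ((Ent g cost mv + Ent cur cost mv * ((mv : Int) + 1)) % MODC)
      else g)
    (fun g mv =>
      if Ent cur cost mv ≠ 0 then
        updM (updM g (cost + 1) (mv + 1) (Ent g (cost + 1) (mv + 1) + Ent cur cost mv)) (cost + 1) m
          (Ent (updM g (cost + 1) (mv + 1) (Ent g (cost + 1) (mv + 1) + Ent cur cost mv)) (cost + 1) m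
            - Ent cur cost mv)
      else g)
    (List.range m) q.1 q.2]
  apply PySem.List.foldl_congr_mem
  intro q2 mv hm2
  simp only [get2_natCast, set2_natCast, set2_s11, set2_s10, get2_s11, get2_s10]
  split_ifs <;> rfl

theorem B_conv {m n : Nat} (cur : List (List Int)) (k : Nat) :
    (PySem.List.pyRange 1 (((k + 1 : Nat) : Int) + 1) 1).foldl (fun nxt cost =>
      ((PySem.List.pyRange 0 (m : Int) 1).foldl (fun (q : List (List Int) × Int) v =>
        (set2 q.1 cost v ((get2 q.1 cost v + (q.2 + get2 (pvQT m n cur k).2 cost v)) % MODC),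
          q.2 + get2 (pvQT m n cur k).2 cost v)) (nxt, 0)).1) (pvQT m n cur k).1
      = gB n m cur k := by
  rw [pvQT_eq cur k]
  rw [show PySem.List.pyRange 1 (((k + 1 : Nat) : Int) + 1) 1
      = (List.range (k + 1)).map (fun (j : Nat) => (1 : Int) + (j : Int)) from by
    have he : ((((k + 1 : Nat) : Int) + 1) - 1).toNat = k + 1 := by omega
    rw [PySem.List.pyRange_one, he]]
  rw [List.foldl_map]
  simp only [one_add_cast]
  show _ = (List.range (k + 1)).foldl (fun g t =>
      ((List.range m).foldl (fun (q : List (List Int) × Int) v =>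
        (updM q.1 (t + 1) v ((Ent q.1 (t + 1) v +
            (q.2 + Ent (phase1D m cur (k + 1) (zeroM n (m + 1))) (t + 1) v)) % MODC),
          q.2 + Ent (phase1D m cur (k + 1) (zeroM n (m + 1))) (t + 1) v)) (g, 0)).1)
    (phase1N m cur (k + 1) (zeroM n m))
  apply PySem.List.foldl_congr_mem
  intro acc j hj
  rw [PySem.List.pyRange_zero_natCast m, List.foldl_map]
  refine congrArg Prod.fst (PySem.List.foldl_congr_mem _ _ _ _ ?_)
  intro q2 v hv
  simp only [get2_natCast, set2_natCast]

-- ===== VERDICT (by name: the statement is the Claim_ definition above) =====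
theorem user_logic_spec : Claim_equal_user_logic := by
  intro N K L R hdom hpre
  unfold Spec_user_logic
  show user_logic N K L R = user_logic_alt N K L R
  by_cases hM0 : R - L + 1 ≤ 0
  · have hvals : PySem.List.pyRange 0 (R - L + 1) 1 = [] := PySem.List.pyRange_one_eq_nil hM0
    simp [user_logic, user_logic_alt, hvals, List.foldl_fixed, hM0]
  · push_neg at hM0
    have hpre2 : 1 ≤ N ∧ -N ≤ K := hpre.resolve_left (by omega)
    obtain ⟨hN1, hK⟩ := hpre2
    have hN : N = (N.toNat : Int) := by omega
    have hM : R - L + 1 = ((R - L + 1).toNat : Int) := by omega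
    set n := N.toNat with hndef
    set m := (R - L + 1).toNat with hmdef
    have hn1 : 1 ≤ n := by omega
    have hm1 : 1 ≤ m := by omega
    have hKn : -(n : Int) ≤ K := by omega
    -- ===== A side =====
    have hA : user_logic N K L R =
        (PySem.List.pyRange K (n : Int) 1).foldl (fun total cost =>
          (PySem.List.pyRange 0 (m : Int) 1).foldl (fun total max_val =>
            (total + get3 ((List.range (n - 1)).foldl (gA m)
                ((List.replicate (n + 1) (zeroM n m)).set 1 (mtxL n m 0)))
              (n : Int) cost max_val) % MODC) total) 0 := by
      simp only [user_logic]
      rw [hM, hN]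
      simp only [pyRange_succ_top, zeros2, zeros1]
      rw [initA hn1]
      rw [show PySem.List.pyRange 1 (n : Int) 1 = (List.range (n - 1)).map (fun (k : Nat) => (1 : Int) + (k : Int)) from by
        have he : ((n : Int) - 1).toNat = n - 1 := by omega
        rw [PySem.List.pyRange_one, he]]
      rw [List.foldl_map]
      simp only [one_add_cast]
      have hstepA : ∀ (dp : List (List (List Int))) (k : Nat), k ∈ List.range (n - 1) → dp.length = n + 1 →
          ((PySem.List.pyRange 0 ((k + 1 : Nat) : Int) 1).foldl (fun dp cost =>
            (PySem.List.pyRange 0 (m : Int) 1).foldl (fun dp max_val =>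
              if get3 dp ((k + 1 : Nat) : Int) cost max_val = 0 then dp
              else (PySem.List.pyRange 0 (m : Int) 1).foldl (fun dp_1 next_val =>
                if max_val < next_val then
                  set3 dp_1 (((k + 1 : Nat) : Int) + 1) (cost + 1) next_val
                    ((get3 dp_1 (((k + 1 : Nat) : Int) + 1) (cost + 1) next_val +
                      get3 dp ((k + 1 : Nat) : Int) cost max_val) % MODC)
                else
                  set3 dp_1 (((k + 1 : Nat) : Int) + 1) cost max_val
                    ((get3 dp_1 (((k + 1 : Nat) : Int) + 1) cost max_val +
                      get3 dp ((k + 1 : Nat) : Int) cost max_val) % MODC)) dp) dp) dp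
            = gA m dp k ∧ (gA m dp k).length = n + 1) := by
        intro dp k hk hP
        have hkn : k + 1 + 1 ≤ n := by simp at hk; omega
        constructor
        · exact A_body (k + 1) (by omega) hkn dp hP
        · show (dp.set (k + 2) _).length = n + 1
          simp [hP]
      rw [(foldl_trans (fun dp => dp.length = n + 1) _ (gA m) (List.range (n - 1)) hstepA
        ((List.replicate (n + 1) (zeroM n m)).set 1 (mtxL n m 0)) (by simp)).1]
    -- ===== B side =====
    have hB : user_logic_alt N K L R =
        (PySem.List.pyRange K (n : Int) 1).foldl (fun total cost =>
          (total + (PySem.List.pyGetD (mtxL n m (n - 1)) cost []).sum) % MODC) 0 := by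
      simp only [user_logic_alt]
      rw [hM, hN]
      rw [if_neg (by omega)]
      simp only [pyRange_succ_top, zeros2]
      rw [initB hn1]
      rw [show PySem.List.pyRange 1 (n : Int) 1 = (List.range (n - 1)).map (fun (k : Nat) => (1 : Int) + (k : Int)) from by
        have he : ((n : Int) - 1).toNat = n - 1 := by omega
        rw [PySem.List.pyRange_one, he]]
      rw [List.foldl_map]
      simp only [one_add_cast]
      have hstepB : ∀ (cur : List (List Int)) (k : Nat), k ∈ List.range (n - 1) → True →
          ((PySem.List.pyRange 1 (((k + 1 : Nat) : Int) + 1) 1).foldl (fun nxt cost =>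
            ((PySem.List.pyRange 0 (m : Int) 1).foldl (fun (q : List (List Int) × Int) v =>
              (set2 q.1 cost v ((get2 q.1 cost v + (q.2 + get2 ((PySem.List.pyRange 0 ((k + 1 : Nat) : Int) 1).foldl (fun p cost =>
            (PySem.List.pyRange 0 (m : Int) 1).foldl (fun (p : List (List Int) × List (List Int)) mv =>
              if get2 cur cost mv ≠ 0 then
                (set2 p.1 cost mv ((get2 p.1 cost mv + get2 cur cost mv * (mv + 1)) % MODC),
                  set2 (set2 p.2 (cost + 1) (mv + 1) (get2 p.2 (cost + 1) (mv + 1) + get2 cur cost mv)) (cost + 1) (m : Int)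
                    (get2 (set2 p.2 (cost + 1) (mv + 1) (get2 p.2 (cost + 1) (mv + 1) + get2 cur cost mv)) (cost + 1) (m : Int)
                      - get2 cur cost mv))
              else p) p) (zeroM n m, zeroM n (m + 1))).2 cost v)) % MODC),
                q.2 + get2 ((PySem.List.pyRange 0 ((k + 1 : Nat) : Int) 1).foldl (fun p cost =>
            (PySem.List.pyRange 0 (m : Int) 1).foldl (fun (p : List (List Int) × List (List Int)) mv =>
              if get2 cur cost mv ≠ 0 then
                (set2 p.1 cost mv ((get2 p.1 cost mv + get2 cur cost mv * (mv + 1)) % MODC),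
                  set2 (set2 p.2 (cost + 1) (mv + 1) (get2 p.2 (cost + 1) (mv + 1) + get2 cur cost mv)) (cost + 1) (m : Int)
                    (get2 (set2 p.2 (cost + 1) (mv + 1) (get2 p.2 (cost + 1) (mv + 1) + get2 cur cost mv)) (cost + 1) (m : Int)
                      - get2 cur cost mv))
              else p) p) (zeroM n m, zeroM n (m + 1))).2 cost v)) (nxt, 0)).1) ((PySem.List.pyRange 0 ((k + 1 : Nat) : Int) 1).foldl (fun p cost =>
            (PySem.List.pyRange 0 (m : Int) 1).foldl (fun (p : List (List Int) × List (List Int)) mv =>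
              if get2 cur cost mv ≠ 0 then
                (set2 p.1 cost mv ((get2 p.1 cost mv + get2 cur cost mv * (mv + 1)) % MODC),
                  set2 (set2 p.2 (cost + 1) (mv + 1) (get2 p.2 (cost + 1) (mv + 1) + get2 cur cost mv)) (cost + 1) (m : Int)
                    (get2 (set2 p.2 (cost + 1) (mv + 1) (get2 p.2 (cost + 1) (mv + 1) + get2 cur cost mv)) (cost + 1) (m : Int)
                      - get2 cur cost mv))
              else p) p) (zeroM n m, zeroM n (m + 1))).1
            = gB n m cur k ∧ True) := by
        intro cur k _ _
        exact ⟨B_conv cur k, trivial⟩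
      rw [(foldl_trans (fun _ => True) _ (gB n m) (List.range (n - 1)) hstepB (mtxL n m 0) trivial).1]
      rw [B_layers hn1 hm1 (n - 1) le_rfl]
    rw [hA, hB]
    -- ===== totals =====
    have hlay := A_layers (n := n) (m := m) hn1 (n - 1) le_rfl
    have hdpn : PySem.List.pyGetD ((List.range (n - 1)).foldl (gA m)
        ((List.replicate (n + 1) (zeroM n m)).set 1 (mtxL n m 0))) (n : Int) [] = mtxL n m (n - 1) := by
      rw [PySem.List.pyGetD_natCast]
      have h2 := hlay.2.1 (n - 1) le_rfl
      rwa [show n - 1 + 1 = n by omega] at h2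
    apply PySem.List.foldl_congr_mem
    intro total cost hc
    rw [PySem.List.mem_pyRange_one] at hc
    have hlenm : (mtxL n m (n - 1)).length = n := (shape_mtxL n m (n - 1)).1
    have hrowmem : PySem.List.pyGetD (mtxL n m (n - 1)) cost [] ∈ mtxL n m (n - 1) :=
      PySem.List.pyGetD_mem _ _ (by rw [hlenm]; exact ⟨by omega, by omega⟩)
    have hrowlen : (PySem.List.pyGetD (mtxL n m (n - 1)) cost []).length = m :=
      (shape_mtxL n m (n - 1)).2 _ hrowmem
    have hrowne : PySem.List.pyGetD (mtxL n m (n - 1)) cost [] ≠ [] := by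
      intro h
      rw [h] at hrowlen
      simp at hrowlen
      omega
    simp only [get3]
    rw [hdpn]
    rw [PySem.List.pyRange_zero_natCast m, List.foldl_map]
    simp only [get2_snd]
    rw [show List.range m = List.range (PySem.List.pyGetD (mtxL n m (n - 1)) cost []).length from by
      rw [hrowlen]]
    rw [foldl_range_getD (fun t x => (t + x) % MODC) (PySem.List.pyGetD (mtxL n m (n - 1)) cost []) total]
    rw [foldl_addmod_sum _ hrowne]
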